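-- pv_equiv track=rewrite | github.com/ojsellers/advent-of-code | 2020/day6/day6.py | get_questions_all_answered
-- ===== SOURCE A (Python) =====
-- def get_questions_all_answered(groups, qs_answered):
--
--     qs_all_answered = 0
--
--     for q_answer, group in zip(qs_answered, groups):
--
--         people = group.split()
--
--         for q in q_answer:
--
--             if all([q in p for p in people]):
--                 qs_all_answered += 1
--
--     return qs_all_answered
-- ===== SOURCE B (Python) =====
-- def get_questions_all_answered(groups, qs_answered):
--     total = 0
--     for q_answer, group in zip(qs_answered, groups):
--         common = None  # None = universal set (empty group: nobody to disagree)
--         for p in group.split():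
--             s = set(p)
--             common = s if common is None else common & s
--         total += sum(1 for q in q_answer if common is None or q in common)
--     return total
-- ===== Notes on version B (the rewrite author's own statement) =====
-- stated objective: alternative
-- what changed: B builds the per-group intersection of each person's answer set once, then counts questions with a single membership pass, instead of rescanning every person for every question as A does.
import Mathlib
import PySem

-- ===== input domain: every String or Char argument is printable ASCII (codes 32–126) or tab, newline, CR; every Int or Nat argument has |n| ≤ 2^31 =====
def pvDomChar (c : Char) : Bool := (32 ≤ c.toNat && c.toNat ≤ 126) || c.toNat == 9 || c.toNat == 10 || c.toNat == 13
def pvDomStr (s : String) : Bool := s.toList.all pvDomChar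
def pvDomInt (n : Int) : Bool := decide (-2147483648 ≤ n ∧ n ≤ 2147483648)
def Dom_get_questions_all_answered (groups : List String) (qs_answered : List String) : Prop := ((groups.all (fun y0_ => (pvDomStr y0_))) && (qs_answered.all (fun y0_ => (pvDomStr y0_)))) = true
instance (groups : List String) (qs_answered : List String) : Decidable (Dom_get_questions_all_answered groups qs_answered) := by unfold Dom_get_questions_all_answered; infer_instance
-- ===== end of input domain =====

-- B builds each group's intersection-of-answer-sets once and counts questions with one membership pass,
-- instead of A's rescan of every person for every question; same results, alternative algorithm.


-- ===== PORT A =====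
-- for q_answer, group in zip(qs_answered, groups): for q in q_answer: if all([q in p for p in people]): += 1
def get_questions_all_answered (groups : List String) (qs_answered : List String) : Int :=
  (qs_answered.zip groups).foldl
    (fun acc pr =>
      let people := PySem.Str.split₀ pr.2
      pr.1.toList.foldl
        (fun acc q =>
          if (people.map (fun p => p.toList.contains q)).all (fun b => b) then acc + 1 else acc)
        acc)
    0

-- ===== PORT B =====
-- common = None; for p in group.split(): s = set(p); common = s if common is None else common & s
def gqaCommon (people : List String) : Option (PySem.Set Char) :=
  people.foldl
    (fun c p =>
      let s := PySem.Set.ofList p.toList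
      match c with
      | none => some s
      | some t => some (PySem.Set.inter t s))
    none

-- 'common is None or q in common'
def gqaTest (c : Option (PySem.Set Char)) (q : Char) : Bool :=
  match c with
  | none => true
  | some s => s.contains q

-- total += sum(1 for q in q_answer if common is None or q in common)
def get_questions_all_answered_alt (groups : List String) (qs_answered : List String) : Int :=
  (qs_answered.zip groups).foldl
    (fun total pr =>
      let common := gqaCommon (PySem.Str.split₀ pr.2)
      total + (pr.1.toList.countP (gqaTest common) : Int))
    0

-- ===== PRECONDITION & SPEC =====
def Spec_get_questions_all_answered (groups : List String) (qs_answered : List String) (out : Int) : Prop := out = get_questions_all_answered_alt groups qs_answered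
instance (groups : List String) (qs_answered : List String) (out : Int) : Decidable (Spec_get_questions_all_answered groups qs_answered out) := by unfold Spec_get_questions_all_answered; infer_instance

-- ===== CLAIM (what is proved, stated in full; the proofs are below) =====
def Claim_equal_get_questions_all_answered : Prop := ∀ (groups : List String) (qs_answered : List String), Dom_get_questions_all_answered groups qs_answered → Spec_get_questions_all_answered groups qs_answered (get_questions_all_answered groups qs_answered)

-- ===== LEMMAS AND PROOFS =====

-- running the intersection loop from a non-None state
lemma gqaCommon_some (people : List String) (t : PySem.Set Char) (q : Char) :
    gqaTest
      (people.foldl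
        (fun c p =>
          let s := PySem.Set.ofList p.toList
          match c with
          | none => some s
          | some t => some (PySem.Set.inter t s))
        (some t)) q
    = (t.contains q && people.all (fun p => p.toList.contains q)) := by
  induction people generalizing t with
  | nil => simp [gqaTest]
  | cons p ps ih =>
    simp only [List.foldl_cons, List.all_cons]
    rw [ih]
    have h : (PySem.Set.inter t (PySem.Set.ofList p.toList)).contains q
        = (t.contains q && p.toList.contains q) := by
      simp [PySem.Set.contains_iff, PySem.Set.mem_inter, PySem.Set.mem_ofList,
        Bool.and_eq_true, List.contains_iff_mem]
    rw [h, Bool.and_assoc]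

-- A's per-question test equals B's membership test in the precomputed intersection
lemma test_eq (people : List String) (q : Char) :
    (people.map (fun p => p.toList.contains q)).all (fun b => b)
    = gqaTest (gqaCommon people) q := by
  cases people with
  | nil => simp [gqaCommon, gqaTest]
  | cons p ps =>
    simp only [gqaCommon, List.foldl_cons]
    rw [gqaCommon_some]
    simp [PySem.Set.contains_iff, PySem.Set.mem_ofList, List.contains_iff_mem, List.all_map,
      Function.comp_def]

-- A's inner counting loop equals acc + B's countP
lemma inner_eq (people : List String) (qa : List Char) (acc : Int) :
    qa.foldl
      (fun acc q =>
        if (people.map (fun p => p.toList.contains q)).all (fun b => b) then acc + 1 else acc)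
      acc
    = acc + (qa.countP (gqaTest (gqaCommon people)) : Int) := by
  have := PySem.List.foldl_if_add_one
    (fun q => (people.map (fun p => p.toList.contains q)).all (fun b => b)) qa acc
  rw [this]
  congr 2
  exact List.countP_congr (fun q _ => by rw [test_eq])

lemma outer_eq (l : List (String × String)) (acc : Int) :
    l.foldl
      (fun acc pr =>
        let people := PySem.Str.split₀ pr.2
        pr.1.toList.foldl
          (fun acc q =>
            if (people.map (fun p => p.toList.contains q)).all (fun b => b) then acc + 1 else acc)
          acc)
      acc
    = l.foldl
      (fun total pr =>
        let common := gqaCommon (PySem.Str.split₀ pr.2)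
        total + (pr.1.toList.countP (gqaTest common) : Int))
      acc := by
  induction l generalizing acc with
  | nil => rfl
  | cons pr rest ih =>
    simp only [List.foldl_cons]
    rw [inner_eq, ih]

-- ===== VERDICT (by name: the statement is the Claim_ definition above) =====
theorem get_questions_all_answered_spec : Claim_equal_get_questions_all_answered := by
  intro groups qs_answered _
  unfold Spec_get_questions_all_answered get_questions_all_answered get_questions_all_answered_alt
  exact outer_eq _ 0
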